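-- pv_equiv track=rewrite | github.com/jmurrayrs/CnpjValidator | Python/CnpjCalculator.py | _gerar_pesos
-- ===== SOURCE A (Python) =====
-- def _gerar_pesos(length: int) -> list[int]:
--     pesos = [0] * length
--     w = 2
--     for i in range(length - 1, -1, -1):
--         pesos[i] = w
--         w += 1
--         if w > 9:
--             w = 2
--     return pesos
-- ===== SOURCE B (Python) =====
-- def _gerar_pesos(length: int) -> list[int]:
--     return [2 + (length - 1 - i) % 8 for i in range(length)]
-- ===== Notes on version B (the rewrite author's own statement) =====
-- stated objective: idiomatic
-- what changed: Replaces the backward loop that threads a mutable cyclic counter w (reset to 2 after 9) through in-place assignments with a single comprehension computing each weight independently by the closed-form modular formula 2 + (length-1-i) % 8.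
import Mathlib
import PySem

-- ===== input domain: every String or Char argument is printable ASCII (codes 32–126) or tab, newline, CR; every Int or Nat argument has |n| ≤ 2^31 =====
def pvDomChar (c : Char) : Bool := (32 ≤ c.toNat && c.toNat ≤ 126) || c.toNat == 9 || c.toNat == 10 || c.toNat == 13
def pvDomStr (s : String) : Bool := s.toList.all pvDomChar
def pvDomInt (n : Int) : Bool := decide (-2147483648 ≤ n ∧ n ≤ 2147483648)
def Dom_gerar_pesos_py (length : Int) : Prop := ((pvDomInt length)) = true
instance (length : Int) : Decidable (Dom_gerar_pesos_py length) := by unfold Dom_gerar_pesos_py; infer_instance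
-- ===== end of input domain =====

-- B replaces A's backward loop threading a mutable cyclic counter (reset to 2 after 9)
-- with a comprehension computing each weight by the closed-form formula 2 + (length-1-i) % 8.

-- ===== PORT A =====
-- pesos = [0] * length  ([0]*k = [] for k ≤ 0, matching Int.toNat); the backward loop
-- threads (pesos, w) through range(length-1, -1, -1), assigning pesos[i] = w in place.
def gerar_pesos_py (length : Int) : List Int :=
  let pesos : List Int := List.replicate length.toNat 0
  let st := (PySem.List.pyRange (length - 1) (-1) (-1)).foldl
    (fun (s : List Int × Int) i =>
      let pesos' := PySem.List.pySetD s.1 i s.2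
      let w' := s.2 + 1
      (pesos', if w' > 9 then 2 else w'))
    (pesos, 2)
  st.1

-- ===== PORT B =====
def gerar_pesos_py_alt (length : Int) : List Int :=
  (PySem.List.pyRange 0 length 1).map (fun i => 2 + PySem.Int.mod (length - 1 - i) 8)

-- ===== PRECONDITION & SPEC =====
def Spec_gerar_pesos_py (length : Int) (out : List Int) : Prop := out = gerar_pesos_py_alt length
instance (length : Int) (out : List Int) : Decidable (Spec_gerar_pesos_py length out) := by unfold Spec_gerar_pesos_py; infer_instance

-- ===== CLAIM (what is proved, stated in full; the proofs are below) =====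
def Claim_equal_gerar_pesos_py : Prop := ∀ (length : Int), Dom_gerar_pesos_py length → Spec_gerar_pesos_py length (gerar_pesos_py length)

-- ===== LEMMAS AND PROOFS =====

-- dropping the first n elements of a list whose n-th slot was just set
theorem pv_drop_set (xs : List Int) (n : Nat) (w : Int) (h : n < xs.length) :
    (xs.set n w).drop n = w :: xs.drop (n + 1) := by
  rw [List.set_eq_take_cons_drop w h,
      List.drop_append_of_le_length (by simp [Nat.le_of_lt h])]
  simp

-- loop invariant for A's backward fold: starting with counter value 2 + c % 8,
-- the fold over range(n-1, -1, -1) fills positions 0..n-1 with 2 + (c + (n-1-i)) % 8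
theorem pv_loop (n : Nat) (c : Nat) (xs : List Int) (hn : n ≤ xs.length) :
    ((PySem.List.pyRange ((n : Int) - 1) (-1) (-1)).foldl
      (fun (s : List Int × Int) i =>
        let pesos' := PySem.List.pySetD s.1 i s.2
        let w' := s.2 + 1
        (pesos', if w' > 9 then 2 else w'))
      (xs, 2 + ((c % 8 : Nat) : Int))).1
    = (List.range n).map (fun i => 2 + (((c + (n - 1 - i)) % 8 : Nat) : Int)) ++ xs.drop n := by
  induction n generalizing c xs with
  | zero =>
      rw [PySem.List.pyRange_neg_one_eq_nil (by omega)]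
      simp
  | succ m ih =>
      have hm1 : ((m + 1 : Nat) : Int) - 1 = (m : Int) := by push_cast; ring
      rw [hm1, PySem.List.pyRange_neg_one_cons (by omega), List.foldl_cons]
      simp only [PySem.List.pySetD_natCast]
      have hw : (if 2 + ((c % 8 : Nat) : Int) + 1 > 9 then (2 : Int) else 2 + ((c % 8 : Nat) : Int) + 1)
          = 2 + (((c + 1) % 8 : Nat) : Int) := by
        by_cases h7 : c % 8 = 7
        · have h0 : (c + 1) % 8 = 0 := by omega
          simp [h7, h0]
        · have h1 : (c + 1) % 8 = c % 8 + 1 := by omega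
          have h2 : ¬ (2 + ((c % 8 : Nat) : Int) + 1 > 9) := by
            have : c % 8 < 8 := Nat.mod_lt _ (by omega)
            push_cast; omega
          rw [if_neg h2, h1]; push_cast; ring
      rw [hw, ih (c + 1) (xs.set m (2 + ((c % 8 : Nat) : Int))) (by simp; omega),
          pv_drop_set xs m _ (by omega),
          List.range_succ, List.map_append, List.append_cons]
      congr 1
      congr 1
      · apply List.map_congr_left
        intro i hi
        have hi' : i < m := List.mem_range.mp hi
        have he : (c + 1 + (m - 1 - i)) % 8 = (c + (m + 1 - 1 - i)) % 8 := by omega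
        rw [he]
      · simp

-- ===== VERDICT (by name: the statement is the Claim_ definition above) =====
theorem gerar_pesos_py_spec : Claim_equal_gerar_pesos_py := by
  intro length _
  unfold Spec_gerar_pesos_py gerar_pesos_py gerar_pesos_py_alt
  by_cases hpos : 0 < length
  · obtain ⟨n, rfl⟩ : ∃ n : Nat, length = (n : Int) := ⟨length.toNat, by omega⟩
    have hl := pv_loop n 0 (List.replicate n 0) (by simp)
    have h2 : (2 : Int) + ((0 % 8 : Nat) : Int) = 2 := by norm_num
    rw [h2] at hl
    simp only [Int.toNat_natCast]
    rw [hl, PySem.List.pyRange_zero_nat, List.map_map]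
    simp only [List.drop_replicate, Nat.sub_self, List.replicate_zero, List.append_nil]
    apply List.map_congr_left
    intro k hk
    have hk' : k < n := List.mem_range.mp hk
    have hc : ((n : Int) - 1 - ((k : Nat) : Int)) = ((n - 1 - k : Nat) : Int) := by omega
    simp only [Function.comp, hc]
    rw [PySem.Int.mod_eq_emod_of_pos (by norm_num)]
    omega
  · have h1 : PySem.List.pyRange (length - 1) (-1) (-1) = [] :=
      PySem.List.pyRange_neg_one_eq_nil (by omega)
    have h2 : PySem.List.pyRange 0 length 1 = [] :=
      PySem.List.pyRange_one_eq_nil (by omega)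
    have h3 : length.toNat = 0 := by omega
    simp [h1, h2, h3]
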